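-- pv_equiv track=rewrite | github.com/tbrixen/cryptopals | 01convertHexToBase64.py | hexStringToBase64
-- ===== SOURCE A (Python) =====
-- BASE64SET = "ABCDEFGHIJKLMNOPQRSTUVWXYZabcdefghijklmnopqrstuvwxyz0123456789+/"
--
-- def getBase64Char(codePoint):
--     if codePoint >= 64 or codePoint < 0:
--         raise ValueError('Codepoint is outside of range: ' + str(codePoint))
--     return BASE64SET[codePoint]
--
-- def hexStringToBase64(hexString):
--     src = int(hexString, 16)
--     result = ""
--     SIX_BIT_MASK = int('111111', 2)
--
--     while(True):
--         if src == 0: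
--             break
--         codePoint = src & SIX_BIT_MASK
--         result = getBase64Char(codePoint) + result
--         src >>= 6
--
--     return result
-- ===== SOURCE B (Python) =====
-- BASE64SET = "ABCDEFGHIJKLMNOPQRSTUVWXYZabcdefghijklmnopqrstuvwxyz0123456789+/"
--
-- def hexStringToBase64(hexString):
--     v = int(hexString, 16)
--     if v == 0:
--         return ""
--     out = []
--     acc = 0
--     nbits = 0
--     for d in reversed(format(v, 'x')):   # stream nibbles, least significant first
--         acc |= int(d, 16) << nbits
--         nbits += 4
--         if nbits >= 6:                    # a 6-bit group is complete: emit it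
--             out.append(BASE64SET[acc & 63])
--             acc >>= 6
--             nbits -= 6
--     if acc:                               # leftover top bits of the leading nibble
--         out.append(BASE64SET[acc])
--     return ''.join(reversed(out))
-- ===== Notes on version B (the rewrite author's own statement) =====
-- stated objective: faster
-- what changed: Instead of repeatedly shifting the whole bigint by 6 and prepending to a string (quadratic), B walks the hex digits once from the least significant end, packing nibbles into a small 6-bit accumulator and emitting base64 characters into a list joined at the end.
import Mathlib
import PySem

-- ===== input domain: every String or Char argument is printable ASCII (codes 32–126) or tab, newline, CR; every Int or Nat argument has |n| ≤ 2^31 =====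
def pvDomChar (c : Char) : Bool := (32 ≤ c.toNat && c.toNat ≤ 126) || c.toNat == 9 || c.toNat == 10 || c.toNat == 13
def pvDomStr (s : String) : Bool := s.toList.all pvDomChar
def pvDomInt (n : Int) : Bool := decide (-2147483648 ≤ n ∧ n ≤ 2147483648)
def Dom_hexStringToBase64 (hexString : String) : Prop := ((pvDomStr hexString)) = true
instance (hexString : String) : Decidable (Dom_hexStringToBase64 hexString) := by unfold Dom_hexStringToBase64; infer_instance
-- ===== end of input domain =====

-- B replaces A's whole-bigint shift-and-prepend loop by one linear pass over the hex
-- digits with a small 6-bit accumulator (objective: faster).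

-- ===== PORT A =====
def base64Chars : List Char :=
  "ABCDEFGHIJKLMNOPQRSTUVWXYZabcdefghijklmnopqrstuvwxyz0123456789+/".toList

-- getBase64Char: the 1-character string BASE64SET[codePoint]; Python raises ValueError
-- outside [0, 64) — that branch is unreachable from the caller (codePoint = src & 63).
def getBase64Char (codePoint : Int) : List Char :=
  if 64 ≤ codePoint ∨ codePoint < 0 then []
  else [(PySem.List.pyGet? base64Chars codePoint).getD 'A']

-- the 'while True' loop; fuel only makes it total (for src ≥ 0, natAbs + 1 steps always suffice)
def hexLoop : Nat → Int → List Char → List Char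
  | 0, _, result => result
  | fuel + 1, src, result =>
    if src = 0 then result
    else hexLoop fuel (src >>> (6 : Nat)) (getBase64Char (PySem.Int.band src 63) ++ result)

def hexStringToBase64 (hexString : String) : String :=
  match PySem.Int.ofStrBase? hexString 16 with
  | none => ""   -- int(hexString, 16) raises ValueError; excluded by Pre_
  | some src => String.ofList (hexLoop (src.natAbs + 1) src [])

-- ===== PORT B =====
def hexDigitChars : List Char := "0123456789abcdef".toList

-- format(v, 'x') for v ≥ 0, hand-ported (exact there): lowercase hex digits, MSB first
def toHexLC (n : Nat) : List Char :=
  if n < 16 then [hexDigitChars.getD n '0']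
  else toHexLC (n / 16) ++ [hexDigitChars.getD (n % 16) '0']

-- int(d, 16) for the lowercase hex digits format(v, 'x') produces (exact on those)
def hexVal (c : Char) : Nat := if c.toNat ≤ 57 then c.toNat - 48 else c.toNat - 87

-- loop body: acc |= int(d,16) << nbits; nbits += 4; if nbits >= 6: emit acc & 63, shift
def bStep (st : Nat × Nat × List Char) (c : Char) : Nat × Nat × List Char :=
  let acc := st.1 ||| (hexVal c <<< st.2.1)
  let nbits := st.2.1 + 4
  if 6 ≤ nbits then (acc >>> 6, nbits - 6, st.2.2 ++ [base64Chars.getD (acc &&& 63) 'A'])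
  else (acc, nbits, st.2.2)

def hexStringToBase64_alt (hexString : String) : String :=
  match PySem.Int.ofStrBase? hexString 16 with
  | none => ""   -- int(hexString, 16) raises ValueError; excluded by Pre_
  | some v =>
    if v = 0 then ""
    else
      -- v.natAbs: under Pre_ v ≥ 0; for v < 0 the Python raises mid-loop (outside Pre_)
      let st := ((toHexLC v.natAbs).reverse).foldl bStep (0, 0, [])
      let out := if st.1 ≠ 0 then st.2.2 ++ [base64Chars.getD st.1 'A'] else st.2.2
      String.ofList out.reverse

-- ===== PRECONDITION & SPEC =====
-- Pre_ holds exactly on the inputs where A returns: int(hexString, 16) must succeed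
-- (otherwise A raises ValueError) with a nonnegative value (on a negative value A's
-- right-shift loop never reaches 0, so A diverges).
def Pre_hexStringToBase64 (hexString : String) : Prop :=
  0 ≤ (PySem.Int.ofStrBase? hexString 16).getD (-1)
instance (hexString : String) : Decidable (Pre_hexStringToBase64 hexString) := by
  unfold Pre_hexStringToBase64; infer_instance

def pvWitness_hexStringToBase64 : String := "1a2f"

def Spec_hexStringToBase64 (hexString : String) (out : String) : Prop :=
  out = hexStringToBase64_alt hexString
instance (hexString : String) (out : String) : Decidable (Spec_hexStringToBase64 hexString out) := by
  unfold Spec_hexStringToBase64; infer_instance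

-- ===== CLAIM (what is proved, stated in full; the proofs are below) =====
def Claim_equal_hexStringToBase64 : Prop :=
  ∀ (hexString : String), Dom_hexStringToBase64 hexString →
    Pre_hexStringToBase64 hexString →
    Spec_hexStringToBase64 hexString (hexStringToBase64 hexString)

-- ===== LEMMAS AND PROOFS =====

-- The common mathematical description: base-64 digits of n, most significant first.
def b64d (n : Nat) : List Nat :=
  if n = 0 then [] else b64d (n / 64) ++ [n % 64]

def b64chr (m : Nat) : Char := base64Chars.getD m 'A'

theorem b64d_zero : b64d 0 = [] := by rw [b64d]; simp

-- ---- A-side ----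

theorem and63_eq_mod (n : Nat) : n &&& 63 = n % 64 := by
  have := Nat.and_two_pow_sub_one_eq_mod n 6
  norm_num at this
  exact this

theorem getBase64Char_band (n : Nat) :
    getBase64Char (PySem.Int.band (n : Int) 63) = [b64chr (n % 64)] := by
  have hb : PySem.Int.band (n : Int) 63 = ((n &&& 63 : Nat) : Int) := by
    exact_mod_cast PySem.Int.band_natCast n 63
  have hlt : n % 64 < 64 := Nat.mod_lt _ (by norm_num)
  rw [hb, and63_eq_mod, getBase64Char]
  rw [if_neg (by push_cast; omega)]
  rw [PySem.List.pyGet?_natCast]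
  simp [b64chr, List.getD]

theorem cast_shiftRight6 (n : Nat) : ((n : Int) >>> (6 : Nat)) = ((n / 64 : Nat) : Int) := by
  have h1 : ((n : Int) >>> (6 : Nat)) = ((n >>> 6 : Nat) : Int) := rfl
  rw [h1, Nat.shiftRight_eq_div_pow]

theorem b64d_pos (n : Nat) (h : n ≠ 0) : b64d n = b64d (n / 64) ++ [n % 64] := by
  rw [b64d, if_neg h]

theorem hexLoop_eq : ∀ (fuel n : Nat) (res : List Char), n ≤ fuel →
    hexLoop fuel (n : Int) res = (b64d n).map b64chr ++ res := by
  intro fuel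
  induction fuel with
  | zero =>
    intro n res h
    have : n = 0 := by omega
    subst this
    simp [hexLoop, b64d]
  | succ fuel ih =>
    intro n res h
    by_cases hn : n = 0
    · subst hn; simp [hexLoop, b64d_zero]
    · rw [hexLoop]
      rw [if_neg (by exact_mod_cast hn)]
      rw [getBase64Char_band, cast_shiftRight6]
      rw [ih (n / 64) _ (by
        have := Nat.div_lt_self (Nat.pos_of_ne_zero hn) (by norm_num : 1 < 64); omega)]
      rw [b64d_pos n hn]
      simp

-- ---- B-side ----

-- hex digits of n, least significant first
def hexLSBd (n : Nat) : List Nat :=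
  if n = 0 then [] else n % 16 :: hexLSBd (n / 16)

def valLSB : List Nat → Nat
  | [] => 0
  | d :: ds => d + 16 * valLSB ds

-- the stream of emitted 6-bit groups (LSB-group first), in plain arithmetic
def groups : List Nat → Nat → Nat → List Nat
  | [], acc, _ => if acc = 0 then [] else [acc]
  | d :: ds, acc, nbits =>
    if 6 ≤ nbits + 4 then
      ((acc + d * 2 ^ nbits) % 64) :: groups ds ((acc + d * 2 ^ nbits) / 64) (nbits + 4 - 6)
    else groups ds (acc + d * 2 ^ nbits) (nbits + 4)

-- bStep with the digit value already extracted (definitionally bStep st c = bStepN st (hexVal c))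
def bStepN (st : Nat × Nat × List Char) (d : Nat) : Nat × Nat × List Char :=
  let acc := st.1 ||| (d <<< st.2.1)
  let nbits := st.2.1 + 4
  if 6 ≤ nbits then (acc >>> 6, nbits - 6, st.2.2 ++ [base64Chars.getD (acc &&& 63) 'A'])
  else (acc, nbits, st.2.2)

def finalizeB (st : Nat × Nat × List Char) : List Char :=
  if st.1 ≠ 0 then st.2.2 ++ [base64Chars.getD st.1 'A'] else st.2.2

theorem or_shift_add (n a b : Nat) (h : a < 2 ^ n) : a ||| (b <<< n) = a + b * 2 ^ n := by
  apply Nat.eq_of_testBit_eq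
  intro j
  have h1 : a + b * 2 ^ n = 2 ^ n * b + a := by ring
  rw [Nat.testBit_lor, Nat.testBit_shiftLeft, h1, Nat.testBit_two_pow_mul_add b h j]
  by_cases hj : j < n
  · simp [hj, Nat.not_le_of_lt hj]
  · simp only [hj, if_false]
    have : a.testBit j = false :=
      Nat.testBit_lt_two_pow (lt_of_lt_of_le h (Nat.pow_le_pow_right (by norm_num) (by omega)))
    simp [this, Nat.le_of_not_lt hj]

theorem shiftRight6_eq_div (a : Nat) : a >>> 6 = a / 64 := by
  rw [Nat.shiftRight_eq_div_pow]

theorem getLast?_cons_ne (d : Nat) (ds : List Nat) (h : ds ≠ []) :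
    (d :: ds).getLast? = ds.getLast? := by
  cases hx : ds.getLast? with
  | none => exact absurd (List.getLast?_eq_none_iff.mp hx) h
  | some x => rw [List.getLast?_cons, hx]; rfl

theorem hexLSBd_zero : hexLSBd 0 = [] := by rw [hexLSBd]; simp

theorem valLSB_hexLSBd : ∀ n, valLSB (hexLSBd n) = n := by
  intro n
  induction n using Nat.strong_induction_on with
  | _ n ih =>
    by_cases h : n = 0
    · subst h; rw [hexLSBd_zero]; rfl
    · rw [hexLSBd, if_neg h, valLSB,
        ih (n / 16) (Nat.div_lt_self (Nat.pos_of_ne_zero h) (by norm_num))]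
      omega

theorem hexLSBd_lt16 : ∀ n, ∀ d ∈ hexLSBd n, d < 16 := by
  intro n
  induction n using Nat.strong_induction_on with
  | _ n ih =>
    by_cases h : n = 0
    · subst h; rw [hexLSBd_zero]; intro d hd; cases hd
    · rw [hexLSBd, if_neg h]
      intro d hd
      rcases List.mem_cons.mp hd with h1 | h1
      · subst h1; omega
      · exact ih (n / 16) (Nat.div_lt_self (Nat.pos_of_ne_zero h) (by norm_num)) d h1

theorem hexLSBd_last : ∀ n, n ≠ 0 → (hexLSBd n).getLast? ≠ some 0 := by
  intro n
  induction n using Nat.strong_induction_on with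
  | _ n ih =>
    intro h
    rw [hexLSBd, if_neg h]
    by_cases hd : n / 16 = 0
    · rw [hd, hexLSBd_zero, List.getLast?_singleton]
      intro hc
      have : n % 16 = 0 := by injection hc
      omega
    · rw [getLast?_cons_ne _ _ (by
        rw [hexLSBd, if_neg hd]; exact List.cons_ne_nil _ _)]
      exact ih (n / 16) (Nat.div_lt_self (Nat.pos_of_ne_zero h) (by norm_num)) hd

theorem hexVal_digit : ∀ m, m < 16 → hexVal (hexDigitChars.getD m '0') = m := by decide

theorem toHexLC_rev_map : ∀ n, n ≠ 0 → ((toHexLC n).reverse).map hexVal = hexLSBd n := by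
  intro n
  induction n using Nat.strong_induction_on with
  | _ n ih =>
    intro h
    by_cases h16 : n < 16
    · rw [toHexLC, if_pos h16]
      rw [List.reverse_singleton, List.map_cons, List.map_nil, hexVal_digit n h16]
      have h0 : n / 16 = 0 := by omega
      rw [hexLSBd, if_neg h, h0, Nat.mod_eq_of_lt h16, hexLSBd_zero]
    · rw [toHexLC, if_neg h16]
      rw [hexLSBd, if_neg h]
      have hd : n / 16 ≠ 0 := by omega
      rw [List.reverse_append, List.reverse_singleton, List.singleton_append, List.map_cons]
      rw [ih (n / 16) (Nat.div_lt_self (Nat.pos_of_ne_zero h) (by norm_num)) hd]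
      rw [hexVal_digit (n % 16) (Nat.mod_lt _ (by norm_num))]

theorem valLSB_pos : ∀ ds : List Nat, ds ≠ [] → ds.getLast? ≠ some 0 → 0 < valLSB ds := by
  intro ds
  induction ds with
  | nil => intro h; exact absurd rfl h
  | cons d ds ih =>
    intro _ hlast
    by_cases hds : ds = []
    · subst hds
      simp [List.getLast?] at hlast
      simp [valLSB]
      omega
    · have := ih hds (by rwa [getLast?_cons_ne d ds hds] at hlast)
      simp [valLSB]
      omega

theorem groups_eq_b64d : ∀ (ds : List Nat) (acc nbits : Nat),
    (∀ d ∈ ds, d < 16) → (nbits = 0 ∨ nbits = 2 ∨ nbits = 4) → acc < 2 ^ nbits →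
    ds.getLast? ≠ some 0 →
    groups ds acc nbits = (b64d (acc + 2 ^ nbits * valLSB ds)).reverse := by
  intro ds
  induction ds with
  | nil =>
    intro acc nbits _ nb3 hacc _
    have h64 : acc < 64 := by
      rcases nb3 with h | h | h <;> subst h <;> omega
    rw [groups]
    simp only [valLSB, Nat.mul_zero, Nat.add_zero]
    by_cases h0 : acc = 0
    · subst h0; simp [b64d_zero]
    · rw [if_neg h0, b64d_pos _ h0]
      have hq : acc / 64 = 0 := by omega
      rw [hq, Nat.mod_eq_of_lt h64, b64d_zero]
      simp
  | cons d ds ih =>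
    intro acc nbits hlt nb3 hacc hlast
    have hd16 : d < 16 := hlt d List.mem_cons_self
    have hrest : ∀ x ∈ ds, x < 16 := fun x hx => hlt x (List.mem_cons_of_mem _ hx)
    have hlast' : ds ≠ [] → ds.getLast? ≠ some 0 := fun hds => by
      rwa [getLast?_cons_ne d ds hds] at hlast
    have hvpos : ds ≠ [] → 0 < valLSB ds := fun hds => valLSB_pos ds hds (hlast' hds)
    have hdpos : ds = [] → 0 < d := by
      intro hds; subst hds
      simp [List.getLast?] at hlast
      omega
    have hval : valLSB (d :: ds) = d + 16 * valLSB ds := rfl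
    have hV : acc + 2 ^ nbits * valLSB (d :: ds) ≠ 0 := by
      rw [hval]
      rcases nb3 with h | h | h <;> subst h <;>
      · by_cases hds : ds = []
        · have := hdpos hds; subst hds; simp [valLSB]; omega
        · have := hvpos hds; omega
    have hlast2 : ds.getLast? ≠ some 0 := by
      by_cases hds : ds = []
      · subst hds; simp
      · exact hlast' hds
    rcases nb3 with h | h | h <;> subst h
    · -- nbits = 0: acc = 0, no emission, nbits becomes 4
      rw [groups, if_neg (by norm_num)]
      have hacc0 : acc = 0 := by omega
      subst hacc0
      rw [ih (0 + d * 2 ^ 0) 4 hrest (by omega) (by norm_num; omega) hlast2]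
      rw [hval]
      congr 2
      ring
    · -- nbits = 2: emit, nbits becomes 0
      rw [groups, if_pos (by norm_num)]
      rw [ih ((acc + d * 2 ^ 2) / 64) (2 + 4 - 6) hrest (by omega) (by norm_num; omega) hlast2]
      rw [hval] at hV ⊢
      rw [b64d_pos _ hV, List.reverse_append, List.reverse_singleton, List.singleton_append,
        List.cons_eq_cons]
      norm_num at hacc ⊢
      constructor
      · omega
      · have e2 : (acc + d * 4) / 64 + valLSB ds = (acc + 4 * (d + 16 * valLSB ds)) / 64 := by
          omega
        rw [e2]
    · -- nbits = 4: emit, nbits becomes 2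
      rw [groups, if_pos (by norm_num)]
      rw [ih ((acc + d * 2 ^ 4) / 64) (4 + 4 - 6) hrest (by omega) (by norm_num; omega) hlast2]
      rw [hval] at hV ⊢
      rw [b64d_pos _ hV, List.reverse_append, List.reverse_singleton, List.singleton_append,
        List.cons_eq_cons]
      norm_num at hacc ⊢
      constructor
      · omega
      · have e2 : (acc + d * 16) / 64 + 4 * valLSB ds = (acc + 16 * (d + 16 * valLSB ds)) / 64 := by
          omega
        rw [e2]

theorem fold_bStepN_groups : ∀ (ds : List Nat) (acc nbits : Nat) (out : List Char),
    (∀ d ∈ ds, d < 16) → (nbits = 0 ∨ nbits = 2 ∨ nbits = 4) → acc < 2 ^ nbits →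
    finalizeB (ds.foldl bStepN (acc, nbits, out)) = out ++ (groups ds acc nbits).map b64chr := by
  intro ds
  induction ds with
  | nil =>
    intro acc nbits _ _ _
    rw [List.foldl_nil, groups, finalizeB]
    by_cases h0 : acc = 0
    · subst h0; simp
    · rw [if_pos h0, if_neg h0]
      simp [b64chr]
  | cons d ds ih =>
    intro acc nbits out hlt nb3 hacc
    have hd16 : d < 16 := hlt d List.mem_cons_self
    have hrest : ∀ x ∈ ds, x < 16 := fun x hx => hlt x (List.mem_cons_of_mem _ hx)
    have hor : acc ||| (d <<< nbits) = acc + d * 2 ^ nbits := or_shift_add nbits acc d hacc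
    rw [List.foldl_cons]
    rcases nb3 with h | h | h <;> subst h <;> norm_num at hor hacc
    · -- nbits = 0: no emission
      have hstep : bStepN (acc, 0, out) d = (acc + d, 4, out) := by
        rw [bStepN]
        norm_num [hor]
      rw [hstep, groups, if_neg (by norm_num)]
      norm_num
      exact ih (acc + d) 4 out hrest (by omega) (by norm_num; omega)
    · -- nbits = 2: emit
      have hstep : bStepN (acc, 2, out) d =
          ((acc + d * 4) / 64, 0, out ++ [base64Chars.getD ((acc + d * 4) % 64) 'A']) := by
        rw [bStepN]
        norm_num [hor, shiftRight6_eq_div, and63_eq_mod]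
      rw [hstep, groups, if_pos (by norm_num)]
      norm_num
      rw [ih ((acc + d * 4) / 64) 0 _ hrest (by omega) (by norm_num; omega)]
      simp [b64chr, List.getD, List.append_assoc]
    · -- nbits = 4: emit
      have hstep : bStepN (acc, 4, out) d =
          ((acc + d * 16) / 64, 2, out ++ [base64Chars.getD ((acc + d * 16) % 64) 'A']) := by
        rw [bStepN]
        norm_num [hor, shiftRight6_eq_div, and63_eq_mod]
      rw [hstep, groups, if_pos (by norm_num)]
      norm_num
      rw [ih ((acc + d * 16) / 64) 2 _ hrest (by omega) (by norm_num; omega)]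
      simp [b64chr, List.getD, List.append_assoc]

theorem foldl_bStep_map (cs : List Char) (st : Nat × Nat × List Char) :
    cs.foldl bStep st = (cs.map hexVal).foldl bStepN st := by
  rw [List.foldl_map]
  rfl

-- port-unfolding bridges (pure iota reductions of the two ports)
theorem portA_some (s : String) (v : Int) (hv : PySem.Int.ofStrBase? s 16 = some v) :
    hexStringToBase64 s = String.ofList (hexLoop (v.natAbs + 1) v []) := by
  unfold hexStringToBase64
  rw [hv]

theorem portB_zero (s : String) (hv : PySem.Int.ofStrBase? s 16 = some 0) :
    hexStringToBase64_alt s = "" := by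
  unfold hexStringToBase64_alt
  rw [hv]
  show (if (0 : Int) = 0 then ""
    else
      let st := ((toHexLC (0 : Int).natAbs).reverse).foldl bStep (0, 0, [])
      let out := if st.1 ≠ 0 then st.2.2 ++ [base64Chars.getD st.1 'A'] else st.2.2
      String.ofList out.reverse) = ""
  rw [if_pos rfl]

theorem portB_some (s : String) (v : Int) (hv : PySem.Int.ofStrBase? s 16 = some v)
    (hnz : v ≠ 0) :
    hexStringToBase64_alt s =
      String.ofList (finalizeB (((toHexLC v.natAbs).reverse).foldl bStep (0, 0, []))).reverse := by
  unfold hexStringToBase64_alt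
  rw [hv]
  show (if v = 0 then ""
    else
      let st := ((toHexLC v.natAbs).reverse).foldl bStep (0, 0, [])
      let out := if st.1 ≠ 0 then st.2.2 ++ [base64Chars.getD st.1 'A'] else st.2.2
      String.ofList out.reverse) = _
  rw [if_neg hnz]
  rfl

-- ===== VERDICT (by name: the statement is the Claim_ definition above) =====
theorem hexStringToBase64_spec : Claim_equal_hexStringToBase64 := by
  intro s _ hPre
  unfold Pre_hexStringToBase64 at hPre
  unfold Spec_hexStringToBase64
  cases hv : PySem.Int.ofStrBase? s 16 with
  | none => rw [hv] at hPre; norm_num at hPre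
  | some v =>
    rw [hv] at hPre
    simp only [Option.getD_some] at hPre
    obtain ⟨n, rfl⟩ : ∃ n : Nat, v = (n : Int) := ⟨v.toNat, (Int.toNat_of_nonneg hPre).symm⟩
    by_cases hn : n = 0
    · subst hn
      rw [portA_some s 0 hv, portB_zero s hv]
      simp [hexLoop]
    · rw [portA_some s _ hv, portB_some s _ hv (by exact_mod_cast hn)]
      have hnat : ((n : Int)).natAbs = n := Int.natAbs_natCast n
      rw [hnat]
      rw [hexLoop_eq (n + 1) n [] (by omega)]
      rw [foldl_bStep_map, toHexLC_rev_map n hn]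
      rw [fold_bStepN_groups (hexLSBd n) 0 0 [] (hexLSBd_lt16 n) (by omega) (by norm_num)]
      rw [groups_eq_b64d (hexLSBd n) 0 0 (hexLSBd_lt16 n) (by omega) (by norm_num)
        (hexLSBd_last n hn)]
      rw [valLSB_hexLSBd]
      simp
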